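-- pv_equiv track=rewrite | github.com/timothyabbott/websocket_server | path_value_matcher.py | matches_subset
-- ===== SOURCE A (Python) =====
-- def matches_subset(sub_set_dict:dict, data_dict:dict):
--
--     if type(sub_set_dict) != type(data_dict):
--         return False
--
--     if isinstance(sub_set_dict, dict):
--         return all(
--             # go through all keys in sub_set_dict and check if they are in data_dict
--             key in data_dict and matches_subset(sub_set_dict[key], data_dict[key])
--             for key in sub_set_dict
--         )
--     # do we want/need to handle lists? this code checks the lists are equal.
--     if isinstance(sub_set_dict, list):
--         return len(sub_set_dict) == len(data_dict) and all(
--             matches_subset(sub_set, full_data) for sub_set, full_data in zip(sub_set_dict, data_dict)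
--         )
--
--     return sub_set_dict == data_dict
-- ===== SOURCE B (Python) =====
-- def matches_subset(sub_set_dict: dict, data_dict: dict):
--     # Iterative version: an explicit stack of (sub, data) work items replaces the recursion.
--     stack = [(sub_set_dict, data_dict)]
--     while stack:
--         sub, data = stack.pop()
--         if type(sub) != type(data):
--             return False
--         if isinstance(sub, dict):
--             for key, value in sub.items():
--                 if key not in data:
--                     return False
--                 stack.append((value, data[key]))
--         elif isinstance(sub, list):
--             if len(sub) != len(data):
--                 return False
--             stack.extend(zip(sub, data))
--         elif sub != data:
--             return False
--     return True
-- ===== Notes on version B (the rewrite author's own statement) =====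
-- stated objective: alternative
-- what changed: Replaces the recursive subset-match with an iterative worklist traversal: an explicit stack of (sub, data) pairs is popped in a single while-loop instead of recursive calls with generator-based all().
import Mathlib
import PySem

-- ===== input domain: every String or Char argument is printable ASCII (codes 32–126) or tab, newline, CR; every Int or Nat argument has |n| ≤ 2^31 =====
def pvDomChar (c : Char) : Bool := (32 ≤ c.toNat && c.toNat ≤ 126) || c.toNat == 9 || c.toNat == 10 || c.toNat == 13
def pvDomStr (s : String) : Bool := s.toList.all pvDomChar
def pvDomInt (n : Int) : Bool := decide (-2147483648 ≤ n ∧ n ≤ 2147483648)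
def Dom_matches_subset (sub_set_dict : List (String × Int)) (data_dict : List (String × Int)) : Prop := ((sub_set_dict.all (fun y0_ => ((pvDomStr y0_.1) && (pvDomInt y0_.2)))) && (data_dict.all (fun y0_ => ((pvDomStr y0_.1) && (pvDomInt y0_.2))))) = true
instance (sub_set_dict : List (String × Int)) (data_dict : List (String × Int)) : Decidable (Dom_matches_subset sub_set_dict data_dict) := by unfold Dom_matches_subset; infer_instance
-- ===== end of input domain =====

-- B replaces A's recursion with an iterative explicit-stack traversal (alternative decomposition, same cost).

-- ===== PORT A =====
-- On the stated input type (dict[str,int]) the recursive call matches_subset(sub[key], data[key])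
-- receives two ints: type(int) == type(int), not a dict, not a list, so it is the leaf comparison ==.
def pvLeafEq (a b : Int) : Bool := a == b

def matches_subset (sub_set_dict : List (String × Int)) (data_dict : List (String × Int)) : Bool :=
  let s := PySem.Dict.ofList sub_set_dict
  let d := PySem.Dict.ofList data_dict
  -- all(key in data_dict and matches_subset(sub_set_dict[key], data_dict[key]) for key in sub_set_dict)
  s.keys.all (fun key => d.contains key && pvLeafEq (s.getD key 0) (d.getD key 0))

-- ===== PORT B =====
-- A work item on the explicit stack: the top-level dict pair, or a pair of int leaves.
inductive PVTask where
  | dicts : PySem.Dict String Int → PySem.Dict String Int → PVTask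
  | leaves : Int → Int → PVTask
deriving DecidableEq, Repr

def pvWeight : PVTask → Nat
  | .dicts s _ => s.items.length + 1
  | .leaves _ _ => 1

-- the for-loop over sub.items: check key membership and push the value pairs (none = early False)
def pvPush (items : List (String × Int)) (d : PySem.Dict String Int) (st : List PVTask) : Option (List PVTask) :=
  match items with
  | [] => some st
  | (k, v) :: rest =>
    match d.get? k with
    | none => none
    | some w => pvPush rest d (PVTask.leaves v w :: st)

theorem pvPush_weight (items : List (String × Int)) (d : PySem.Dict String Int) (st st' : List PVTask)
    (h : pvPush items d st = some st') :
    (st'.map pvWeight).sum = items.length + (st.map pvWeight).sum := by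
  induction items generalizing st with
  | nil => simp [pvPush] at h; simp [h]
  | cons kv rest ih =>
    obtain ⟨k, v⟩ := kv
    simp only [pvPush] at h
    cases hg : d.get? k with
    | none => rw [hg] at h; exact absurd h (by simp)
    | some w =>
      rw [hg] at h
      have := ih _ h
      simp [pvWeight] at this ⊢
      omega

-- the while-loop over the stack
def pvLoop (st : List PVTask) : Bool :=
  match st with
  | [] => true
  | PVTask.dicts s d :: rest =>
    match hp : pvPush s.items d rest with
    | none => false
    | some st' => pvLoop st'
  | PVTask.leaves a b :: rest => if a == b then pvLoop rest else false
termination_by (st.map pvWeight).sum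
decreasing_by
  · rw [pvPush_weight s.items d rest st' hp]; simp [pvWeight]
  · simp [pvWeight]

def matches_subset_alt (sub_set_dict : List (String × Int)) (data_dict : List (String × Int)) : Bool :=
  pvLoop [PVTask.dicts (PySem.Dict.ofList sub_set_dict) (PySem.Dict.ofList data_dict)]

-- ===== PRECONDITION & SPEC =====
def Spec_matches_subset (sub_set_dict : List (String × Int)) (data_dict : List (String × Int)) (out : Bool) : Prop := out = matches_subset_alt sub_set_dict data_dict
instance (sub_set_dict : List (String × Int)) (data_dict : List (String × Int)) (out : Bool) : Decidable (Spec_matches_subset sub_set_dict data_dict out) := by unfold Spec_matches_subset; infer_instance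

-- ===== CLAIM (what is proved, stated in full; the proofs are below) =====
def Claim_equal_matches_subset : Prop := ∀ (sub_set_dict : List (String × Int)) (data_dict : List (String × Int)), Dom_matches_subset sub_set_dict data_dict → Spec_matches_subset sub_set_dict data_dict (matches_subset sub_set_dict data_dict)

-- ===== LEMMAS AND PROOFS =====

-- the for-loop fails (early False) exactly when some key of sub is missing in data
theorem pvPush_none (items : List (String × Int)) (d : PySem.Dict String Int) (st : List PVTask)
    (h : pvPush items d st = none) :
    items.all (fun kv => d.contains kv.1 && pvLeafEq kv.2 (d.getD kv.1 0)) = false := by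
  induction items generalizing st with
  | nil => simp [pvPush] at h
  | cons kv rest ih =>
    obtain ⟨k, v⟩ := kv
    simp only [pvPush] at h
    cases hg : d.get? k with
    | none =>
      have hc : d.contains k = false := by
        rw [PySem.Dict.contains_eq_isSome_get?, hg]; rfl
      simp [hc]
    | some w =>
      rw [hg] at h
      simp [ih _ h]

-- pushing this dict's pairs then looping = checking all its pairs, then the rest of the stack
theorem pvPush_some (items : List (String × Int)) (d : PySem.Dict String Int) (st st' : List PVTask)
    (h : pvPush items d st = some st') :
    pvLoop st' = (items.all (fun kv => d.contains kv.1 && pvLeafEq kv.2 (d.getD kv.1 0)) && pvLoop st) := by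
  induction items generalizing st with
  | nil => simp [pvPush] at h; simp [h]
  | cons kv rest ih =>
    obtain ⟨k, v⟩ := kv
    simp only [pvPush] at h
    cases hg : d.get? k with
    | none => rw [hg] at h; exact absurd h (by simp)
    | some w =>
      rw [hg] at h
      have hc : d.contains k = true := by
        rw [PySem.Dict.contains_eq_isSome_get?, hg]; rfl
      have hgd : d.getD k 0 = w := PySem.Dict.getD_of_get?_eq_some d 0 hg
      rw [ih _ h]
      have hl : pvLoop (PVTask.leaves v w :: st) = if v == w then pvLoop st else false := by
        rw [pvLoop]
      rw [hl]
      simp only [List.all_cons, hc, hgd, pvLeafEq, Bool.true_and]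
      cases hvw : (v == w) <;> simp

theorem matches_subset_eq_alt (sub_set_dict data_dict : List (String × Int)) :
    matches_subset sub_set_dict data_dict = matches_subset_alt sub_set_dict data_dict := by
  simp only [matches_subset, matches_subset_alt]
  rw [pvLoop]
  split
  · next hp =>
    have h1 := pvPush_none _ _ _ hp
    rw [PySem.Dict.items_eq_map_keys _ (PySem.Dict.nodup_keys_ofList sub_set_dict) 0,
        List.all_map] at h1
    simpa [Function.comp] using h1
  · next st' hp =>
    rw [pvPush_some _ _ _ _ hp]
    have hnd : (PySem.Dict.ofList sub_set_dict).keys.Nodup := PySem.Dict.nodup_keys_ofList _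
    rw [PySem.Dict.items_eq_map_keys _ hnd 0, List.all_map]
    have hln : pvLoop ([] : List PVTask) = true := by rw [pvLoop]
    simp only [hln, Bool.and_true, Function.comp_def]

-- ===== VERDICT (by name: the statement is the Claim_ definition above) =====
theorem matches_subset_spec : Claim_equal_matches_subset := by
  intro sub data _
  exact matches_subset_eq_alt sub data
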